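-- pv_equiv track=rewrite | github.com/kjjh714/programmers | 프로그래머스/0/181855. 문자열 묶기/문자열 묶기.py | solution
-- ===== SOURCE A (Python) =====
-- def solution(strArr):
--     dic = {}
--
--     for i in strArr:
--         length = len(i)
--         if length in dic:
--             dic[length].append(i)
--         else:
--             dic[length] =  [i]
--
--     max_dic = max(len(dic) for dic in dic.values())
--
--     return max_dic
-- ===== SOURCE B (Python) =====
-- def solution(strArr):
--     lengths = sorted(len(s) for s in strArr)
--     best = 0
--     cur = 0
--     prev = None
--     for L in lengths:
--         cur = cur + 1 if prev == L else 1
--         prev = L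
--         if cur > best:
--             best = cur
--     return best
-- ===== Notes on version B (the rewrite author's own statement) =====
-- stated objective: alternative
-- what changed: B replaces A's hash-grouping dict of lists by sorting the string lengths and taking the longest run in one linear scan (no dict, no grouped lists).
import Mathlib
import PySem

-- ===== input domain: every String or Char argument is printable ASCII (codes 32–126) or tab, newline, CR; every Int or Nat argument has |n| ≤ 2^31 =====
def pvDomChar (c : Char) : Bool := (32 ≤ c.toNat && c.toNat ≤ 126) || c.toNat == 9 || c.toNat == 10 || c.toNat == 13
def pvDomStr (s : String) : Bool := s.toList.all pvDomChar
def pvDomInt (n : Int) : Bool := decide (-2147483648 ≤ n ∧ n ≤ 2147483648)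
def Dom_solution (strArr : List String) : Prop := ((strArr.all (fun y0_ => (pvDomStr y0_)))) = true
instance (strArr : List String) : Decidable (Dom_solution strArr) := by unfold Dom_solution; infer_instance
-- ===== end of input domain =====

-- B replaces A's hash-grouping dict by a sort of the lengths plus a longest-run scan (alternative decomposition, return value only).

-- ===== PORT A =====
def solution (strArr : List String) : Int :=
  let d := strArr.foldl (fun d i =>
      let length : Int := PySem.Str.len i
      if d.contains length then d.modify length [] (fun g => g ++ [i])
      else d.insert length [i])
    (PySem.Dict.empty : PySem.Dict Int (List String))
  match PySem.List.max? (d.values.map (fun g => (g.length : Int))) (fun x => x) with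
  | some m => m
  | none => 0    -- unreachable inside Pre_solution: Python's max raises ValueError on the empty sequence

-- ===== PORT B =====
-- the 'for L in lengths' loop of Source B, state (best, cur, prev)
def pvScan : List Int → Int → Int → Option Int → Int
  | [], best, _, _ => best
  | L :: t, best, cur, prev =>
    let cur' := if prev == some L then cur + 1 else 1
    pvScan t (if cur' > best then cur' else best) cur' (some L)

def solution_alt (strArr : List String) : Int :=
  let lengths := PySem.List.sorted (strArr.map (fun s => PySem.Str.len s)) (fun x => x) false
  pvScan lengths 0 0 none

-- ===== PRECONDITION & SPEC =====
-- Pre_ excludes only the empty list, on which A's max() raises ValueError.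
def Pre_solution (strArr : List String) : Prop := strArr ≠ []
instance (strArr : List String) : Decidable (Pre_solution strArr) := by unfold Pre_solution; infer_instance
def pvWitness_solution : List String := (["a", "bc", "d"])

def Spec_solution (strArr : List String) (out : Int) : Prop := out = solution_alt strArr
instance (strArr : List String) (out : Int) : Decidable (Spec_solution strArr out) := by unfold Spec_solution; infer_instance

-- ===== CLAIM (what is proved, stated in full; the proofs are below) =====
def Claim_equal_solution : Prop := ∀ (strArr : List String), Dom_solution strArr → Pre_solution strArr → Spec_solution strArr (solution strArr)

-- ===== LEMMAS AND PROOFS =====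

-- the common value both ports compute: the largest multiplicity in the list of lengths
def pvMaxCount (l : List Int) : Int :=
  match PySem.List.max? ((PySem.Set.ofList l).map (fun v => (l.count v : Int))) (fun x => x) with
  | some m => m
  | none => 0

theorem pvScan_max (l : List Int) : ∀ (a b c : Int) (p : Option Int),
    pvScan l (max a b) c p = max a (pvScan l b c p) := by
  induction l with
  | nil => intro a b c p; rfl
  | cons x t ih =>
    intro a b c p
    show pvScan t (if (if p == some x then c + 1 else 1) > max a b then _ else _) _ _ = _
    set c' := (if p == some x then c + 1 else 1) with hc'
    have h1 : (if c' > max a b then c' else max a b) = max a (if c' > b then c' else b) := by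
      simp only [max_def]; split_ifs <;> omega
    rw [h1, ih]
    rfl

theorem pvScan_run (v : Int) : ∀ (k : Nat) (rest : List Int) (b c : Int), c ≤ b →
    pvScan (List.replicate k v ++ rest) b c (some v)
      = pvScan rest (max b (c + k)) (c + k) (some v) := by
  intro k
  induction k with
  | zero => intro rest b c h; simp [max_eq_left h]
  | succ k ih =>
    intro rest b c h
    rw [List.replicate_succ, List.cons_append]
    show pvScan (List.replicate k v ++ rest)
      (if (if (some v == some v) then c + 1 else 1) > b then _ else b) _ _ = _
    have hbeq : (some v == some v) = true := by simp
    rw [hbeq]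
    simp only [if_true]
    have hif : (if c + 1 > b then c + 1 else b) = max b (c + 1) := by
      simp only [max_def]; split_ifs <;> omega
    rw [hif, ih rest (max b (c + 1)) (c + 1) (le_max_right _ _)]
    congr 1
    · simp only [max_def]; split_ifs <;> push_cast <;> omega
    · push_cast; ring

theorem max?_id_eq_of_mem_iff (X Y : List Int) (h : ∀ a, a ∈ X ↔ a ∈ Y) :
    PySem.List.max? X (fun x => x) = PySem.List.max? Y (fun x => x) := by
  cases hX : PySem.List.max? X (fun x : Int => x) with
  | none =>
    rw [PySem.List.max?_eq_none_iff] at hX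
    subst hX
    cases hY : PySem.List.max? Y (fun x : Int => x) with
    | none => rfl
    | some m => exact absurd ((h m).mpr (PySem.List.max?_mem hY)) (List.not_mem_nil)
  | some m =>
    cases hY : PySem.List.max? Y (fun x : Int => x) with
    | none =>
      rw [PySem.List.max?_eq_none_iff] at hY
      subst hY
      exact absurd ((h m).mp (PySem.List.max?_mem hX)) (List.not_mem_nil)
    | some m' =>
      have h1 := PySem.List.max?_isMax hX m' ((h m').mpr (PySem.List.max?_mem hY))
      have h2 := PySem.List.max?_isMax hY m ((h m).mp (PySem.List.max?_mem hX))
      exact congrArg some (le_antisymm h2 h1)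

theorem pvMaxCount_perm (l l' : List Int) (h : l.Perm l') : pvMaxCount l = pvMaxCount l' := by
  unfold pvMaxCount
  rw [max?_id_eq_of_mem_iff]
  intro a
  simp only [List.mem_map, PySem.Set.mem_ofList]
  constructor
  · rintro ⟨v, hv, rfl⟩; exact ⟨v, h.mem_iff.mp hv, by rw [h.count_eq]⟩
  · rintro ⟨v, hv, rfl⟩; exact ⟨v, h.mem_iff.mpr hv, by rw [h.count_eq]⟩

theorem foldl_max_comm (t : List Int) : ∀ (a b : Int), t.foldl max (max a b) = max a (t.foldl max b) := by
  induction t with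
  | nil => intro a b; rfl
  | cons x t ih =>
    intro a b
    show t.foldl max (max (max a b) x) = max a (t.foldl max (max b x))
    rw [max_assoc, ih]

theorem pvMaxCount_cons_run (x : Int) (k : Nat) (r : List Int) (hx : x ∉ r) :
    pvMaxCount (x :: (List.replicate k x ++ r)) = max ((k : Int) + 1) (pvMaxCount r) := by
  have hcx : ((x :: (List.replicate k x ++ r)).count x : Int) = (k : Int) + 1 := by
    simp [List.count_cons_self, List.count_append,
      List.count_eq_zero.mpr hx]
  have hcv : ∀ v, v ≠ x → (x :: (List.replicate k x ++ r)).count v = r.count v := by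
    intro v hvx
    simp [List.count_append, List.count_replicate, Ne.symm hvx]
  conv_lhs => rw [pvMaxCount]
  rw [max?_id_eq_of_mem_iff _
    (((k : Int) + 1) :: (PySem.Set.ofList r).map (fun v => (r.count v : Int)))]
  · rw [PySem.List.max?_id_cons]
    cases hXr : ((PySem.Set.ofList r).map (fun v => (r.count v : Int))) with
    | nil =>
      have hr : r = [] := by
        cases r with
        | nil => rfl
        | cons y r' =>
          exfalso
          have : ((r'.count y : Int) + 1) ∈ ((PySem.Set.ofList (y :: r')).map
              (fun v => ((y :: r').count v : Int))) :=
            List.mem_map.mpr ⟨y, (PySem.Set.mem_ofList _ _).mpr (by simp), by simp [List.count_cons_self]⟩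
          rw [hXr] at this
          exact List.not_mem_nil this
      subst hr
      show ((k : Int) + 1) = max ((k : Int) + 1) (pvMaxCount [])
      have h0 : pvMaxCount [] = 0 := rfl
      rw [h0]
      exact (max_eq_left (by positivity)).symm
    | cons c t =>
      have hmr : pvMaxCount r = t.foldl max c := by
        rw [pvMaxCount, hXr, PySem.List.max?_id_cons]
      rw [hmr]
      show (c :: t).foldl max ((k : Int) + 1) = _
      rw [List.foldl_cons, ← foldl_max_comm]
  · intro a
    constructor
    · intro haX
      obtain ⟨v, hvS, hva⟩ := List.mem_map.mp haX
      have hvl : v ∈ x :: (List.replicate k x ++ r) := (PySem.Set.mem_ofList _ _).mp hvS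
      by_cases hvx : v = x
      · subst hvx
        exact List.mem_cons.mpr (Or.inl (hva ▸ hcx))
      · have hvr : v ∈ r := by
          rcases List.mem_cons.mp hvl with rfl | hv'
          · exact absurd rfl hvx
          · rcases List.mem_append.mp hv' with hrep | hr'
            · exact absurd (List.eq_of_mem_replicate hrep) hvx
            · exact hr'
        refine List.mem_cons.mpr (Or.inr (List.mem_map.mpr ⟨v, (PySem.Set.mem_ofList _ _).mpr hvr, ?_⟩))
        rw [← hva, hcv v hvx]
    · intro haY
      rcases List.mem_cons.mp haY with rfl | ha
      · exact List.mem_map.mpr ⟨x, (PySem.Set.mem_ofList _ _).mpr (by simp), hcx⟩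
      · obtain ⟨v, hvS, hva⟩ := List.mem_map.mp ha
        have hvr : v ∈ r := (PySem.Set.mem_ofList _ _).mp hvS
        have hvx : v ≠ x := fun h => hx (h ▸ hvr)
        refine List.mem_map.mpr ⟨v, (PySem.Set.mem_ofList _ _).mpr (by simp [hvr]), ?_⟩
        rw [hcv v hvx, hva]

theorem sorted_head_run (x : Int) : ∀ (t : List Int), (x :: t).Pairwise (· ≤ ·) →
    ∃ r, t = List.replicate (t.count x) x ++ r ∧ x ∉ r ∧ r.Pairwise (· ≤ ·) := by
  intro t
  induction t with
  | nil => intro _; exact ⟨[], by simp, by simp, List.Pairwise.nil⟩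
  | cons y t' ih =>
    intro h
    by_cases hyx : y = x
    · subst hyx
      obtain ⟨r, hr, hxr, hrp⟩ := ih h.of_cons
      refine ⟨r, ?_, hxr, hrp⟩
      rw [List.count_cons_self, List.replicate_succ, List.cons_append, ← hr]
    · have hxmem : x ∉ y :: t' := by
        intro hmem
        have h1 : x ≤ y := (List.pairwise_cons.mp h).1 y (by simp)
        rcases List.mem_cons.mp hmem with rfl | hmem'
        · exact hyx rfl
        · have h2 : y ≤ x := (List.pairwise_cons.mp h.of_cons).1 x hmem'
          exact hyx (le_antisymm h2 h1)
      refine ⟨y :: t', ?_, hxmem, h.of_cons⟩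
      rw [List.count_eq_zero.mpr hxmem, List.replicate_zero, List.nil_append]

theorem pvScan_sorted : ∀ (n : Nat) (l : List Int), l.length ≤ n → l.Pairwise (· ≤ ·) →
    pvScan l 0 0 none = pvMaxCount l := by
  intro n
  induction n with
  | zero =>
    intro l hl _
    rw [List.length_eq_zero_iff.mp (Nat.le_zero.mp hl)]
    rfl
  | succ n ih =>
    intro l hl hp
    cases l with
    | nil => rfl
    | cons x t =>
      obtain ⟨r, hr, hxr, hrp⟩ := sorted_head_run x t hp
      set k := t.count x with hk
      have h1 : pvScan (x :: t) 0 0 none = pvScan t 1 1 (some x) := by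
        show pvScan t (if (if (none == some x) then (0:Int) + 1 else 1) > 0 then _ else 0) _ _ = _
        norm_num
      rw [h1, hr, pvScan_run x k r 1 1 le_rfl]
      have hmax1 : max (1:Int) (1 + (k : Int)) = 1 + k :=
        max_eq_right (by omega)
      rw [hmax1]
      cases r with
      | nil =>
        rw [pvMaxCount_cons_run x k [] (by simp)]
        have h0 : pvMaxCount [] = 0 := rfl
        rw [h0, max_eq_left (by positivity)]
        show (1 + (k : Int)) = (k : Int) + 1
        ring
      | cons y r' =>
        have hyxne : x ≠ y := fun h => hxr (h ▸ List.mem_cons_self)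
        have h2 : pvScan (y :: r') (1 + (k : Int)) (1 + (k : Int)) (some x)
            = pvScan r' (1 + (k : Int)) 1 (some y) := by
          show pvScan r' (if (if (some x == some y) then _ + 1 else 1) > _ then _ else _) _ _ = _
          have hb : (some x == some y) = false := by simp [hyxne]
          rw [hb]
          simp only [Bool.false_eq_true, if_false]
          congr 1
          split_ifs <;> omega
        rw [h2]
        have h3 : pvScan r' (1 + (k : Int)) 1 (some y)
            = max (1 + (k : Int)) (pvScan r' 1 1 (some y)) := by
          rw [← pvScan_max]
          congr 1
          simp only [max_def]; split_ifs <;> omega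
        have h4 : pvScan (y :: r') 0 0 none = pvScan r' 1 1 (some y) := by
          show pvScan r' (if (if (none == some y) then (0:Int) + 1 else 1) > 0 then _ else 0) _ _ = _
          norm_num
        have hlen : (y :: r').length ≤ n := by
          have hlt := congrArg List.length hr
          simp only [List.length_append, List.length_replicate] at hlt
          have ht : t.length ≤ n := by simpa using hl
          omega
        rw [h3, ← h4, ih (y :: r') hlen hrp, pvMaxCount_cons_run x k (y :: r') hxr]
        congr 1
        omega

theorem scan_sorted_eq_maxCount (l : List Int) :
    pvScan (PySem.List.sorted l (fun x => x) false) 0 0 none = pvMaxCount l := by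
  rw [pvScan_sorted (PySem.List.sorted l (fun x => x) false).length _ le_rfl
    (PySem.List.sorted_pairwise l (fun x => x))]
  exact pvMaxCount_perm _ l (PySem.List.sorted_perm l (fun x => x) false)

theorem solution_eq_maxCount (strArr : List String) :
    solution strArr = pvMaxCount (strArr.map (fun s => PySem.Str.len s)) := by
  unfold solution
  have hfun : (fun (d : PySem.Dict Int (List String)) (i : String) =>
      let length : Int := PySem.Str.len i
      if d.contains length then d.modify length [] (fun g => g ++ [i])
      else d.insert length [i])
      = fun d i => d.modify (PySem.Str.len i) [] (fun g => g ++ [i]) := by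
    funext d i
    by_cases h : d.contains (PySem.Str.len i)
    · simp only [h, if_true]
    · rw [if_neg h]
      rw [PySem.Dict.modify, PySem.Dict.getD,
        (PySem.Dict.get?_eq_none_iff_contains d _).mpr (by simpa using h)]
      rfl
  rw [hfun]
  set d := strArr.foldl (fun d i => d.modify (PySem.Str.len i) [] (fun g => g ++ [i]))
    (PySem.Dict.empty : PySem.Dict Int (List String)) with hd
  have hkeys : d.keys = PySem.Set.ofList (strArr.map (fun s => PySem.Str.len s)) := by
    rw [hd, PySem.Dict.keys_foldl_modify_key strArr (fun s => PySem.Str.len s) []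
      (fun _ i => fun g => g ++ [i]) PySem.Dict.empty]
    rfl
  have hnodup : d.keys.Nodup := by
    rw [hd]
    exact PySem.Dict.nodup_keys_foldl_modify_key strArr (fun s => PySem.Str.len s) []
      (fun _ i => fun g => g ++ [i]) PySem.Dict.empty (by simp [PySem.Dict.empty, PySem.Dict.keys])
  have hgetD : ∀ L : Int, d.getD L [] = strArr.filter (fun i => PySem.Str.len i == L) := by
    intro L
    have hmap : d = (strArr.map (fun i => (PySem.Str.len i, i))).foldl
        (fun d p => d.modify p.1 [] (fun g => g ++ [p.2])) PySem.Dict.empty := by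
      rw [hd, List.foldl_map]
    rw [hmap, PySem.Dict.getD_foldl_modify_append]
    simp only [List.filter_map, List.map_map]
    simp [Function.comp_def]
  have hvals : d.values.map (fun g => (g.length : Int))
      = (PySem.Set.ofList (strArr.map (fun s => PySem.Str.len s))).map
          (fun v => ((strArr.map (fun s => PySem.Str.len s)).count v : Int)) := by
    rw [PySem.Dict.values_eq_map_keys d hnodup [], List.map_map, hkeys]
    refine List.map_congr_left (fun k _ => ?_)
    simp only [Function.comp_apply, hgetD k]
    congr 1
    rw [← List.countP_eq_length_filter, List.count, List.countP_map]
    rfl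
  show (match PySem.List.max? (d.values.map (fun g => (g.length : Int))) (fun x => x) with
    | some m => m | none => 0) = _
  rw [hvals]
  rfl

-- ===== VERDICT (by name: the statement is the Claim_ definition above) =====
theorem solution_spec : Claim_equal_solution := by
  intro strArr _ _
  unfold Spec_solution solution_alt
  rw [solution_eq_maxCount strArr, ← scan_sorted_eq_maxCount]
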